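-- pv_equiv track=rewrite | github.com/mresccc/ZalupiX | app/service/google_data.py | _is_vertical_event_df
-- ===== SOURCE A (Python) =====
-- def _is_vertical_event_df(row) -> bool:
--     """Проверяет вертикальные события (занимающие всю неделю) - DataFrame версия"""
--     for col_idx in range(1, len(row)):
--         activity = str(row[col_idx]).strip() if row[col_idx] is not None else ""
--         if activity and len(activity) > 3:
--             same_events = sum(
--                 1
--                 for i in range(col_idx, len(row))
--                 if i < len(row) and str(row[i]).strip() == activity
--             )
--             if same_events >= 3:
--                 return True
--     return False
-- ===== SOURCE B (Python) =====
-- def _is_vertical_event_df(row) -> bool: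
--     """Sort the qualifying stripped values once, then detect a run of 3 equal
--     values in a single linear pass (replaces A's repeated inner rescans)."""
--     vals = sorted(
--         s
--         for s in ((str(x).strip() if x is not None else "") for x in row[1:])
--         if len(s) > 3
--     )
--     if not vals:
--         return False
--     prev, run = vals[0], 1
--     for v in vals[1:]:
--         run = run + 1 if v == prev else 1
--         if run >= 3:
--             return True
--         prev = v
--     return False
-- ===== Notes on version B (the rewrite author's own statement) =====
-- stated objective: alternative
-- what changed: Replaces A's per-column rescan of the whole row (counting matches for each qualifying cell) by collecting the qualifying stripped values once, sorting them, and detecting a run of three equal values in one linear pass.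
import Mathlib
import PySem

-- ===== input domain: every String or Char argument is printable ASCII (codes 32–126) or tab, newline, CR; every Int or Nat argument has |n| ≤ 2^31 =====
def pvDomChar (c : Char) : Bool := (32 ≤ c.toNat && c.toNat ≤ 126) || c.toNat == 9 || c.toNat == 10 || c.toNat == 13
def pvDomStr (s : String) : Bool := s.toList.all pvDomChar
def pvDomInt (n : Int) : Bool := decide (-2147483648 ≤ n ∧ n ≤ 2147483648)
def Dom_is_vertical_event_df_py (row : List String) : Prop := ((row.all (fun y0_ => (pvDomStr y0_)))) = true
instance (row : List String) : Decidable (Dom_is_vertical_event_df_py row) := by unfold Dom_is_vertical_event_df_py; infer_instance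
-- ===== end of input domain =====

-- B replaces A's per-column rescans by sorting the qualifying stripped values
-- once and scanning the sorted list for a run of three equal values.

-- ===== PORT A =====
-- literal transliteration of A: the for-with-early-return is .any over range(1, len(row));
-- the elements are strings, so the Python 'if row[col] is not None' branch never yields "".
def is_vertical_event_df_py (row : List String) : Bool :=
  (PySem.List.pyRange 1 (row.length : Int) 1).any fun col =>
    let activity := PySem.Str.strip (PySem.List.pyGetD row col "")
    (!(activity == "") && decide (3 < PySem.Str.len activity)) &&
      decide (3 ≤ ((PySem.List.pyRange col (row.length : Int) 1).filter
        (fun i => decide (i < (row.length : Int)) &&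
          (PySem.Str.strip (PySem.List.pyGetD row i "") == activity))).length)

-- ===== PORT B =====
-- run-of-equals scan over the sorted values (Source B's for-loop with prev/run state)
def pvRunScan : List String → String → Nat → Bool
  | [], _, _ => false
  | v :: rest, prev, run =>
    let run' := if v == prev then run + 1 else 1
    if 3 ≤ run' then true else pvRunScan rest v run'

def is_vertical_event_df_py_alt (row : List String) : Bool :=
  let vals := PySem.List.sorted
    (((row.drop 1).map PySem.Str.strip).filter (fun s => decide (3 < PySem.Str.len s)))
    (fun s => s) false
  match vals with
  | [] => false
  | v :: rest => pvRunScan rest v 1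

-- ===== PRECONDITION & SPEC =====
def Spec_is_vertical_event_df_py (row : List String) (out : Bool) : Prop := out = is_vertical_event_df_py_alt row
instance (row : List String) (out : Bool) : Decidable (Spec_is_vertical_event_df_py row out) := by unfold Spec_is_vertical_event_df_py; infer_instance

-- ===== CLAIM (what is proved, stated in full; the proofs are below) =====
def Claim_equal_is_vertical_event_df_py : Prop := ∀ (row : List String), Dom_is_vertical_event_df_py row → Spec_is_vertical_event_df_py row (is_vertical_event_df_py row)

-- ===== LEMMAS AND PROOFS =====

-- the multiset of qualifying stripped values, common to both characterisations
def pvVals (row : List String) : List String :=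
  ((row.drop 1).map PySem.Str.strip).filter (fun s => decide (3 < PySem.Str.len s))

-- a string of length > 3 is nonempty
lemma pv_len_ne_empty {s : String} (h : 3 < PySem.Str.len s) : (s == "") = false := by
  rw [beq_eq_false_iff_ne]
  rintro rfl
  exact absurd h (by decide)

-- B-side: the run scan on a ≤-sorted tail detects exactly a value of total count ≥ 3
lemma pv_runScan_iff (l : List String) (prev : String) (run : Nat)
    (hs : l.Pairwise (· ≤ ·)) (hmin : ∀ x ∈ l, prev ≤ x) (hrun : run < 3) :
    pvRunScan l prev run = true ↔
      (3 ≤ run + l.count prev) ∨ ∃ v ∈ l, v ≠ prev ∧ 3 ≤ l.count v := by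
  induction l generalizing prev run with
  | nil =>
    simp [pvRunScan]
    omega
  | cons v rest ih =>
    rcases List.pairwise_cons.mp hs with ⟨hv, hs'⟩
    by_cases hvp : v = prev
    · subst hvp
      by_cases h3 : 3 ≤ run + 1
      · have hl : pvRunScan (v :: rest) v run = true := by
          simp [pvRunScan, h3]
        rw [hl, List.count_cons_self]
        constructor
        · intro _; left; omega
        · intro _; rfl
      · have hl : pvRunScan (v :: rest) v run = pvRunScan rest v (run + 1) := by
          simp [pvRunScan, h3]
        rw [hl, ih v (run + 1) hs' hv (by omega), List.count_cons_self]
        constructor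
        · rintro (h | ⟨w, hw, hwne, hwc⟩)
          · left; omega
          · right
            exact ⟨w, List.mem_cons_of_mem _ hw, hwne,
              by rwa [List.count_cons_of_ne (Ne.symm hwne)]⟩
        · rintro (h | ⟨w, hw, hwne, hwc⟩)
          · left; omega
          · rcases List.mem_cons.mp hw with rfl | hw'
            · exact absurd rfl hwne
            · right
              exact ⟨w, hw', hwne, by rwa [List.count_cons_of_ne (Ne.symm hwne)] at hwc⟩
    · have hpv : prev ≤ v := hmin v (List.mem_cons_self ..)
      have hnotin : prev ∉ rest := fun hmem => hvp (le_antisymm (hv prev hmem) hpv)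
      have hcnt0 : List.count prev (v :: rest) = 0 := by
        rw [List.count_cons_of_ne hvp]
        exact List.count_eq_zero.mpr hnotin
      have hl : pvRunScan (v :: rest) prev run = pvRunScan rest v 1 := by
        simp [pvRunScan, hvp]
      rw [hl, ih v 1 hs' hv (by omega), hcnt0]
      constructor
      · rintro (h1 | ⟨w, hw, hwne, hwc⟩)
        · right
          exact ⟨v, List.mem_cons_self .., hvp, by rw [List.count_cons_self]; omega⟩
        · right
          refine ⟨w, List.mem_cons_of_mem _ hw, fun hwprev => hnotin (hwprev ▸ hw), ?_⟩
          rwa [List.count_cons_of_ne (Ne.symm hwne)]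
      · rintro (h1 | ⟨w, hw, hwne, hwc⟩)
        · exact absurd h1 (by omega)
        · rcases List.mem_cons.mp hw with rfl | hw'
          · left; rw [List.count_cons_self] at hwc; omega
          · by_cases hwv : w = v
            · subst hwv; left; rw [List.count_cons_self] at hwc; omega
            · right
              exact ⟨w, hw', hwv, by rwa [List.count_cons_of_ne (Ne.symm hwv)] at hwc⟩

lemma pv_B_iff (row : List String) :
    is_vertical_event_df_py_alt row = true ↔ ∃ v, 3 ≤ (pvVals row).count v := by
  have hB : is_vertical_event_df_py_alt row =
      (match PySem.List.sorted (pvVals row) (fun s => s) false with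
       | [] => false
       | v :: rest => pvRunScan rest v 1) := rfl
  rw [hB]
  have hperm := PySem.List.sorted_perm (pvVals row) (fun s => s) false
  have hpw := PySem.List.sorted_pairwise (pvVals row) (fun s => s)
  cases hsort : PySem.List.sorted (pvVals row) (fun s => s) false with
  | nil =>
    have h0 : pvVals row = [] := (PySem.List.sorted_eq_nil_iff _ _ _).mp hsort
    simp [h0]
  | cons v rest =>
    rw [hsort] at hperm hpw
    have hpw' : (v :: rest).Pairwise (fun a b => a ≤ b) := hpw
    rcases List.pairwise_cons.mp hpw' with ⟨hv, hs'⟩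
    have hcnt : ∀ w, (pvVals row).count w = (v :: rest).count w :=
      fun w => (hperm.count_eq w).symm
    show pvRunScan rest v 1 = true ↔ ∃ w, 3 ≤ (pvVals row).count w
    rw [pv_runScan_iff rest v 1 hs' hv (by omega)]
    constructor
    · rintro (h1 | ⟨w, hw, hwne, hwc⟩)
      · exact ⟨v, by rw [hcnt v, List.count_cons_self]; omega⟩
      · exact ⟨w, by rw [hcnt w, List.count_cons_of_ne (Ne.symm hwne)]; omega⟩
    · rintro ⟨w, hw⟩
      rw [hcnt w] at hw
      by_cases hwv : w = v
      · subst hwv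
        rw [List.count_cons_self] at hw
        left; omega
      · rw [List.count_cons_of_ne (Ne.symm hwv)] at hw
        right
        have hwmem : w ∈ rest := List.count_pos_iff.mp (by omega)
        exact ⟨w, hwmem, hwv, hw⟩

-- first-occurrence lemma: the suffix from the first match carries the whole count
lemma pv_first (t : List String) (p : String → Bool) (h : ∃ x ∈ t, p x = true) :
    ∃ k, ∃ hk : k < t.length, p t[k] = true ∧ (t.drop k).countP p = t.countP p := by
  induction t with
  | nil => simp at h
  | cons x xs ih =>
    by_cases hx : p x = true
    · exact ⟨0, by simp, by simpa using hx, by simp⟩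
    · have h' : ∃ y ∈ xs, p y = true := by
        rcases h with ⟨y, hy, hpy⟩
        rcases List.mem_cons.mp hy with rfl | hy'
        · exact absurd hpy hx
        · exact ⟨y, hy', hpy⟩
      rcases ih h' with ⟨k, hk, hpk, hcnt⟩
      refine ⟨k + 1, by simpa using Nat.succ_lt_succ hk, by simpa using hpk, ?_⟩
      have hc : (x :: xs).countP p = xs.countP p := by
        simp [hx]
      simpa [hc] using hcnt

-- A's inner generator-sum over range(col, len(row)) is a countP over the suffix
lemma pv_inner_count (row : List String) (a : String) (col : Int) (h0 : 0 ≤ col) :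
    ((PySem.List.pyRange col (row.length : Int) 1).filter
        (fun i => decide (i < (row.length : Int)) &&
          (PySem.Str.strip (PySem.List.pyGetD row i "") == a))).length
      = (row.drop col.toNat).countP (fun x => PySem.Str.strip x == a) := by
  rw [← List.countP_eq_length_filter]
  have h1 : (PySem.List.pyRange col (row.length : Int) 1).countP
      (fun i => decide (i < (row.length : Int)) &&
        (PySem.Str.strip (PySem.List.pyGetD row i "") == a))
    = (PySem.List.pyRange col (row.length : Int) 1).countP
      (fun i => PySem.Str.strip (PySem.List.pyGetD row i "") == a) := by
    refine List.countP_congr (fun i hi => ?_)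
    have h2 := (PySem.List.mem_pyRange_one.mp hi).2
    simp [h2]
  rw [h1]
  have h2 : (PySem.List.pyRange col (row.length : Int) 1).countP
      (fun i => PySem.Str.strip (PySem.List.pyGetD row i "") == a)
    = List.countP (fun x => PySem.Str.strip x == a)
        ((PySem.List.pyRange col (row.length : Int) 1).map
          (fun j => PySem.List.pyGetD row j "")) := by
    rw [List.countP_map]
    rfl
  rw [h2, PySem.List.map_pyGetD_pyRange' row "" h0]

-- the count of a qualifying value in pvVals, as a countP over the stripped tail
lemma pv_count_vals (row : List String) (a : String) (ha : 3 < PySem.Str.len a) :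
    (pvVals row).count a = (row.drop 1).countP (fun x => PySem.Str.strip x == a) := by
  unfold pvVals
  rw [List.count_filter (by simpa using ha), List.count_eq_countP, List.countP_map]
  rfl

lemma pv_A_iff (row : List String) :
    is_vertical_event_df_py row = true ↔ ∃ v, 3 ≤ (pvVals row).count v := by
  unfold is_vertical_event_df_py
  rw [List.any_eq_true]
  constructor
  · rintro ⟨col, hcol, hf⟩
    rcases PySem.List.mem_pyRange_one.mp hcol with ⟨h1, h2⟩
    simp only [Bool.and_eq_true, decide_eq_true_eq] at hf
    rcases hf with ⟨⟨-, hlen⟩, hcnt⟩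
    rw [pv_inner_count row _ col (by omega)] at hcnt
    refine ⟨PySem.Str.strip (PySem.List.pyGetD row col ""), ?_⟩
    rw [pv_count_vals row _ hlen]
    have hsub : (row.drop col.toNat).Sublist (row.drop 1) := by
      have hdd : row.drop col.toNat = (row.drop 1).drop (col.toNat - 1) := by
        rw [List.drop_drop]
        congr 1
        omega
      rw [hdd]
      exact List.drop_sublist _ _
    exact le_trans hcnt hsub.countP_le
  · rintro ⟨v, hv⟩
    have hmemv : v ∈ pvVals row := List.count_pos_iff.mp (by omega)
    have hS : 3 < PySem.Str.len v := by
      have := (List.mem_filter.mp hmemv).2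
      simpa using this
    have hmem2 : v ∈ (row.drop 1).map PySem.Str.strip := (List.mem_filter.mp hmemv).1
    rcases List.mem_map.mp hmem2 with ⟨x, hx, hxv⟩
    have hex : ∃ x ∈ row.drop 1, (PySem.Str.strip x == v) = true := ⟨x, hx, by simp [hxv]⟩
    rcases pv_first (row.drop 1) (fun x => PySem.Str.strip x == v) hex with ⟨k, hk, hpk, hcnt⟩
    have hlen1 : (row.drop 1).length = row.length - 1 := by simp
    have hklt : k + 1 < row.length := by omega
    have htn : ((k : Int) + 1).toNat = k + 1 := by omega
    have hval : PySem.Str.strip (PySem.List.pyGetD row ((k : Int) + 1) "") = v := by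
      rw [PySem.List.pyGetD_eq_getElem row "" (by omega) (by omega)]
      rw [List.getElem_drop] at hpk
      simp only [show ((k : Int) + 1).toNat = 1 + k from by omega]
      exact eq_of_beq hpk
    refine ⟨(k : Int) + 1, PySem.List.mem_pyRange_one.mpr ⟨by omega, by omega⟩, ?_⟩
    simp only [Bool.and_eq_true, decide_eq_true_eq]
    rw [hval]
    refine ⟨⟨by rw [pv_len_ne_empty hS]; rfl, hS⟩, ?_⟩
    rw [pv_inner_count row v ((k : Int) + 1) (by omega), htn]
    have hdd : row.drop (k + 1) = (row.drop 1).drop k := by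
      rw [List.drop_drop]
      congr 1
      omega
    rw [hdd, hcnt, ← pv_count_vals row v hS]
    exact hv

-- ===== VERDICT (by name: the statement is the Claim_ definition above) =====
theorem is_vertical_event_df_py_spec : Claim_equal_is_vertical_event_df_py := by
  intro row _
  unfold Spec_is_vertical_event_df_py
  exact Bool.coe_iff_coe.mp ((pv_A_iff row).trans (pv_B_iff row).symm)
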